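-- pv_equiv track=rewrite | github.com/NREL/openstudio-standards | data/openstudio_standards_data/applications/create_openstudio_standards_json.py | find_closest_record
-- ===== SOURCE A (Python) =====
-- def is_record_present(records: list, field: str, value: str) -> bool | dict:
--     """Check if a record (field, value pair) is available among a set of records
--
--     :param records (list): list of records
--     :param field (str): field to search
--     :param value (str): targeted value of the field
--     :return: false if record cannot be found otherwise record (dict)
--     """
--     for r in records:
--         if value in r[field]:
--             return r
--     return False
--
-- def find_closest_record(
--     records: list, field: str, value: str, missing_data_lookup_hierarchy: list
-- ) -> dict:
--     """Find closest available record to a value from a data lookup hierarchy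
--
--     :param records (list): list of records
--     :param field (str): field to search
--     :param value (str): targeted value of the field
--     :param missing_data_lookup_hierarchy (list): list (ordered) of values to use to look up record if targeted value cannot be found
--     :return: record (dict)
--     """
--     r = is_record_present(records, field, value)
--     if r is False:
--         for code in missing_data_lookup_hierarchy:
--             r_next = is_record_present(records, field, code)
--             if isinstance(r_next, dict):
--                 return r_next
--         assert r
--     else:
--         return r
-- ===== SOURCE B (Python) =====
-- def find_closest_record(records, field, value, missing_data_lookup_hierarchy):
--     """Single pass over records: track the record matching the lowest-priority
--     candidate (value first, then hierarchy codes); early exit on a direct value match."""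
--     candidates = [value] + list(missing_data_lookup_hierarchy)
--     best = None  # (candidate index, record)
--     for r in records:
--         s = r[field]
--         i = next((i for i, c in enumerate(candidates) if c in s), None)
--         if i is None:
--             continue
--         if i == 0:
--             return r
--         if best is None or i < best[0]:
--             best = (i, r)
--     assert best is not None
--     return best[1]
-- ===== Notes on version B (the rewrite author's own statement) =====
-- stated objective: alternative
-- what changed: Replaces A's candidate-outer strategy (one full scan of records per candidate: value, then each hierarchy code) by a single record-outer pass that keeps the record matching the lowest candidate index seen so far, with an early exit on a direct value match.
import Mathlib
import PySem

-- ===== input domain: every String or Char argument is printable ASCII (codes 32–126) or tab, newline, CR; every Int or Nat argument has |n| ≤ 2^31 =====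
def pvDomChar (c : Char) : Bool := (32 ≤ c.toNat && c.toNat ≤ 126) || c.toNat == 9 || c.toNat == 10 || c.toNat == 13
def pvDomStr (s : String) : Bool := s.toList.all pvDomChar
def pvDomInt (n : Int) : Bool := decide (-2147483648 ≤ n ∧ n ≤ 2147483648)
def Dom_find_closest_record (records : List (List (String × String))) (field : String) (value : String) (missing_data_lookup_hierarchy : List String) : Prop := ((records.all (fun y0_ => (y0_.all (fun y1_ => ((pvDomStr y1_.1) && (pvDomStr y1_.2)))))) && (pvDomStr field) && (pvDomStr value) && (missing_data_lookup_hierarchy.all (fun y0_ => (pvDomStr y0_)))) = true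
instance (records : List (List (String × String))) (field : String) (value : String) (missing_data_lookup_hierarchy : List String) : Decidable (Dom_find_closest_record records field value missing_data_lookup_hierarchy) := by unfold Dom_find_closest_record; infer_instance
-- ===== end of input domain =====

-- B replaces A's candidate-outer scans (value, then each hierarchy code, each over all records)
-- by one record-outer pass keeping the record with the lowest matching candidate index (alternative, not claimed faster).

-- ===== PORT A =====
-- is_record_present: outer Option none = KeyError on r[field]; inner Option none = Python's False
def pvIsRecordPresent (records : List (List (String × String))) (field : String) (value : String) : Option (Option (List (String × String))) :=
  match records with
  | [] => some none
  | r :: rest =>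
    match (PySem.Dict.mk r).get? field with
    | none => none
    | some s => if PySem.Str.isIn value s then some (some r) else pvIsRecordPresent rest field value

-- the 'for code in missing_data_lookup_hierarchy' loop; [] stands for the KeyError / failed `assert r` paths (excluded by Pre_)
def pvHierLoop (records : List (List (String × String))) (field : String) (hier : List String) : List (String × String) :=
  match hier with
  | [] => []
  | code :: rest =>
    match pvIsRecordPresent records field code with
    | none => []
    | some (some r) => r
    | some none => pvHierLoop records field rest

def find_closest_record (records : List (List (String × String))) (field : String) (value : String) (missing_data_lookup_hierarchy : List String) : List (String × String) :=
  match pvIsRecordPresent records field value with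
  | none => []
  | some (some r) => r
  | some none => pvHierLoop records field missing_data_lookup_hierarchy

-- ===== PORT B =====
-- single pass over records; best = some (candidate index, record); [] stands for the KeyError / failed assert paths
def pvBestLoop (field : String) (cands : List String) (todo : List (List (String × String))) (best : Option (Nat × List (String × String))) : List (String × String) :=
  match todo with
  | [] => match best with | some (_, br) => br | none => []
  | r :: rest =>
    match (PySem.Dict.mk r).get? field with
    | none => []
    | some s =>
      match cands.findIdx? (fun c => PySem.Str.isIn c s) with
      | none => pvBestLoop field cands rest best
      | some i =>
        if i = 0 then r
        else
          match best with
          | none => pvBestLoop field cands rest (some (i, r))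
          | some (bi, _) =>
            if i < bi then pvBestLoop field cands rest (some (i, r)) else pvBestLoop field cands rest best

def find_closest_record_alt (records : List (List (String × String))) (field : String) (value : String) (missing_data_lookup_hierarchy : List String) : List (String × String) :=
  pvBestLoop field (value :: missing_data_lookup_hierarchy) records none

-- ===== PRECONDITION & SPEC =====
-- r has the field (r[field] does not raise)
def pvHasF (field : String) (r : List (String × String)) : Bool := ((PySem.Dict.mk r).get? field).isSome
-- `c in r[field]` (false when the field is absent; only used where presence is known)
def pvPred (field c : String) (r : List (String × String)) : Bool :=
  match (PySem.Dict.mk r).get? field with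
  | some s => PySem.Str.isIn c s
  | none => false

-- Pre_ = exactly the inputs where A returns normally: every record missing the field is preceded by a
-- record matching value (else r[field] raises KeyError), and some candidate matches some record (else `assert` fails).
def Pre_find_closest_record (records : List (List (String × String))) (field : String) (value : String) (missing_data_lookup_hierarchy : List String) : Prop :=
  (∀ j < records.length, pvHasF field (records.getD j []) = false →
      ∃ k < j, pvPred field value (records.getD k []) = true)
  ∧ (∃ c ∈ value :: missing_data_lookup_hierarchy, ∃ r ∈ records, pvPred field c r = true)
instance (records : List (List (String × String))) (field : String) (value : String) (missing_data_lookup_hierarchy : List String) : Decidable (Pre_find_closest_record records field value missing_data_lookup_hierarchy) := by unfold Pre_find_closest_record; infer_instance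

def pvWitness_find_closest_record : (List (List (String × String))) × String × String × List String :=
  ([[("fuel", "Gas")], [("fuel", "Oil")]], "fuel", "Oil", ["Gas"])

def Spec_find_closest_record (records : List (List (String × String))) (field : String) (value : String) (missing_data_lookup_hierarchy : List String) (out : List (String × String)) : Prop := out = find_closest_record_alt records field value missing_data_lookup_hierarchy
instance (records : List (List (String × String))) (field : String) (value : String) (missing_data_lookup_hierarchy : List String) (out : List (String × String)) : Decidable (Spec_find_closest_record records field value missing_data_lookup_hierarchy out) := by unfold Spec_find_closest_record; infer_instance

-- ===== CLAIM (what is proved, stated in full; the proofs are below) =====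
def Claim_equal_find_closest_record : Prop := ∀ (records : List (List (String × String))) (field : String) (value : String) (missing_data_lookup_hierarchy : List String), Dom_find_closest_record records field value missing_data_lookup_hierarchy → Pre_find_closest_record records field value missing_data_lookup_hierarchy → Spec_find_closest_record records field value missing_data_lookup_hierarchy (find_closest_record records field value missing_data_lookup_hierarchy)

-- ===== LEMMAS AND PROOFS =====

theorem pvWitness_ok :
    Dom_find_closest_record (pvWitness_find_closest_record.1) (pvWitness_find_closest_record.2.1) (pvWitness_find_closest_record.2.2.1) (pvWitness_find_closest_record.2.2.2) ∧
    Pre_find_closest_record (pvWitness_find_closest_record.1) (pvWitness_find_closest_record.2.1) (pvWitness_find_closest_record.2.2.1) (pvWitness_find_closest_record.2.2.2) := by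
  decide

-- findSome? only looks at members (congruence)
theorem pv_findSome?_congr {α β : Type} {f g : α → Option β} (l : List α)
    (h : ∀ a ∈ l, f a = g a) : l.findSome? f = l.findSome? g := by
  induction l with
  | nil => rfl
  | cons a t ih =>
    simp only [List.findSome?_cons, h a (List.mem_cons_self), ih (fun x hx => h x (List.mem_cons_of_mem _ hx))]

-- If the value scan hit a record (first match r), B's pass early-exits at the same record.
theorem pvL1 (field value : String) (records : List (List (String × String))) (r : List (String × String))
    (h : pvIsRecordPresent records field value = some (some r)) :
    ∀ (cs : List String) (best : Option (Nat × List (String × String))),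
      pvBestLoop field (value :: cs) records best = r := by
  induction records with
  | nil => simp [pvIsRecordPresent] at h
  | cons r0 rest ih =>
    intro cs best
    unfold pvIsRecordPresent at h
    cases hget : (PySem.Dict.mk r0).get? field with
    | none => rw [hget] at h; cases h
    | some s =>
      rw [hget] at h
      by_cases hin : PySem.Chars.isIn value.toList s.toList = true
      · simp [hin] at h
        subst h
        simp [pvBestLoop, hget, List.findIdx?_cons, hin]
      · simp [hin] at h
        simp only [pvBestLoop, hget]
        rw [List.findIdx?_cons]
        simp only [PySem.Str.isIn_eq, hin]
        cases hidx : cs.findIdx? (fun c => PySem.Chars.isIn c.toList s.toList) with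
        | none => simpa [hidx] using ih h cs best
        | some j =>
          simp only [Option.map_some]
          cases best with
          | none => exact ih h cs _
          | some b =>
            obtain ⟨bi, br⟩ := b
            by_cases hlt : j + 1 < bi <;> simp [hlt, ih h]

-- If the value scan completed with no match, every record has the field and none matches value.
theorem pvL2 (field value : String) (records : List (List (String × String)))
    (h : pvIsRecordPresent records field value = some none) :
    ∀ r ∈ records, pvHasF field r = true ∧ pvPred field value r = false := by
  induction records with
  | nil => intro r hr; cases hr
  | cons r0 rest ih =>
    unfold pvIsRecordPresent at h
    cases hget : (PySem.Dict.mk r0).get? field with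
    | none => rw [hget] at h; cases h
    | some s =>
      rw [hget] at h
      by_cases hin : PySem.Chars.isIn value.toList s.toList = true
      · simp [hin] at h
      · simp [hin] at h
        intro r hr
        rcases List.mem_cons.mp hr with hr0 | hr1
        · subst hr0
          exact ⟨by simp [pvHasF, hget], by simp [pvPred, hget, hin]⟩
        · exact ih h r hr1

-- With every field present, is_record_present is List.find?.
theorem pvL3 (field : String) (records : List (List (String × String)))
    (hall : ∀ r ∈ records, pvHasF field r = true) (c : String) :
    pvIsRecordPresent records field c = some (records.find? (fun r => pvPred field c r)) := by
  induction records with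
  | nil => rfl
  | cons r0 rest ih =>
    have h0 : ((PySem.Dict.mk r0).get? field).isSome := hall r0 List.mem_cons_self
    obtain ⟨s, hget⟩ := Option.isSome_iff_exists.mp h0
    unfold pvIsRecordPresent
    rw [hget, List.find?_cons]
    by_cases hin : PySem.Chars.isIn c.toList s.toList = true
    · simp [hin, pvPred, hget]
    · simp only [pvPred, hget]
      simpa [hin] using ih (fun r hr => hall r (List.mem_cons_of_mem _ hr))

-- With every field present, A's hierarchy loop is a findSome? over the codes.
theorem pvL4 (field : String) (records : List (List (String × String))) (hier : List String)
    (hall : ∀ r ∈ records, pvHasF field r = true) :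
    pvHierLoop records field hier
      = (hier.findSome? (fun c => records.find? (fun r => pvPred field c r))).getD [] := by
  induction hier with
  | nil => rfl
  | cons c rest ih =>
    unfold pvHierLoop
    rw [pvL3 field records hall c, List.findSome?_cons]
    cases hf : records.find? (fun r => pvPred field c r) with
    | none => simpa using ih
    | some r => simp

-- If the value scan raised KeyError, Pre_'s first conjunct fails.
theorem pvL5 (field value : String) (records : List (List (String × String)))
    (h : pvIsRecordPresent records field value = none) :
    ∃ j < records.length, pvHasF field (records.getD j []) = false ∧
      ∀ k < j, pvPred field value (records.getD k []) = false := by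
  induction records with
  | nil => simp [pvIsRecordPresent] at h
  | cons r0 rest ih =>
    unfold pvIsRecordPresent at h
    cases hget : (PySem.Dict.mk r0).get? field with
    | none =>
      exact ⟨0, by simp, by simp [pvHasF, hget], by intro k hk; omega⟩
    | some s =>
      rw [hget] at h
      by_cases hin : PySem.Chars.isIn value.toList s.toList = true
      · simp [hin] at h
      · simp [hin] at h
        obtain ⟨j, hj, hnf, hn⟩ := ih h
        refine ⟨j + 1, by simpa using hj, by simpa using hnf, ?_⟩
        intro k hk
        cases k with
        | zero => simp [pvPred, hget, hin]
        | succ k' => simpa using hn k' (by omega)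

-- Reference form of B's accumulator state (proof helper only).
def pvRefB (field : String) (cands : List String) (todo : List (List (String × String)))
    (best : Option (Nat × List (String × String))) : List (String × String) :=
  match best with
  | none => (cands.findSome? (fun c => todo.find? (fun r => pvPred field c r))).getD []
  | some (bi, br) => ((cands.take bi).findSome? (fun c => todo.find? (fun r => pvPred field c r))).getD br

-- Splitting a candidate prefix at the first index matching r0.
theorem pvSplit (field : String) (cands : List String) (r0 : List (String × String))
    (rest : List (List (String × String))) (i n : Nat) (hin : i < n) (hi : i < cands.length)
    (hFi : pvPred field cands[i] r0 = true) (hlt : ∀ j < i, ∀ (hj : j < cands.length), pvPred field cands[j] r0 = false) :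
    (cands.take n).findSome? (fun c => (r0 :: rest).find? (fun r => pvPred field c r))
      = ((cands.take i).findSome? (fun c => rest.find? (fun r => pvPred field c r))).or (some r0) := by
  have hsplit : cands.take n = cands.take i ++ cands[i] :: (cands.drop (i + 1)).take (n - i - 1) := by
    have h3 : cands.take n = cands.take i ++ (cands.drop i).take (n - i) := by
      rw [← List.take_add]; congr 1; omega
    rw [h3, List.drop_eq_getElem_cons hi]
    have h2 : n - i = (n - i - 1) + 1 := by omega
    rw [h2, List.take_succ_cons]
    simp
  rw [hsplit, List.findSome?_append, List.findSome?_cons, List.find?_cons]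
  simp only [hFi]
  have hcongr : (cands.take i).findSome? (fun c => (r0 :: rest).find? (fun r => pvPred field c r))
      = (cands.take i).findSome? (fun c => rest.find? (fun r => pvPred field c r)) := by
    apply pv_findSome?_congr
    intro c hc
    obtain ⟨j, hjm, hje⟩ := List.mem_take_iff_getElem.mp hc
    have hj1 : j < i := lt_of_lt_of_le hjm (min_le_left _ _)
    have hj2 : j < cands.length := lt_of_lt_of_le hjm (min_le_right _ _)
    rw [List.find?_cons]
    have : pvPred field c r0 = false := by rw [← hje]; exact hlt j hj1 hj2
    simp only [this]
  rw [hcongr]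

-- KEY: B's pass from any accumulator computes the first record matching the lowest candidate index.
theorem pvKey (field : String) (cands : List String) (todo : List (List (String × String)))
    (best : Option (Nat × List (String × String)))
    (hall : ∀ r ∈ todo, pvHasF field r = true)
    (h0 : ∀ r ∈ todo, cands.findIdx? (fun c => pvPred field c r) ≠ some 0) :
    pvBestLoop field cands todo best = pvRefB field cands todo best := by
  induction todo generalizing best with
  | nil =>
    have hnone : ∀ (l : List String), l.findSome? (fun _ => (none : Option (List (String × String)))) = none :=
      fun l => List.findSome?_eq_none_iff.mpr (fun c _ => rfl)
    cases best with
    | none => simp [pvBestLoop, pvRefB, hnone]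
    | some b => obtain ⟨bi, br⟩ := b; simp [pvBestLoop, pvRefB, hnone]
  | cons r0 rest ih =>
    have hallr := fun r hr => hall r (List.mem_cons_of_mem _ hr)
    have h0r := fun r hr => h0 r (List.mem_cons_of_mem _ hr)
    obtain ⟨s, hget⟩ := Option.isSome_iff_exists.mp (hall r0 List.mem_cons_self)
    have hfun : (fun c => PySem.Str.isIn c s) = (fun c => pvPred field c r0) := by
      funext c; simp [pvPred, hget]
    simp only [pvBestLoop, hget, hfun]
    cases hidx : cands.findIdx? (fun c => pvPred field c r0) with
    | none =>
      have hmem : ∀ c ∈ cands, pvPred field c r0 = false := by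
        intro c hc
        simpa using List.findIdx?_eq_none_iff.mp hidx c hc
      have hcg : ∀ (l : List String), (∀ c ∈ l, c ∈ cands) →
          l.findSome? (fun c => (r0 :: rest).find? (fun r => pvPred field c r))
            = l.findSome? (fun c => rest.find? (fun r => pvPred field c r)) := by
        intro l hl
        apply pv_findSome?_congr
        intro c hc
        rw [List.find?_cons]
        simp only [hmem c (hl c hc)]
      rw [ih best hallr h0r]
      cases best with
      | none => simp only [pvRefB, hcg cands (fun c hc => hc)]
      | some b =>
        obtain ⟨bi, br⟩ := b
        simp only [pvRefB, hcg (cands.take bi) (fun c hc => List.mem_of_mem_take hc)]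
    | some i =>
      obtain ⟨hi, hFi, hlt⟩ := List.findIdx?_eq_some_iff_getElem.mp hidx
      have hlt' : ∀ j < i, ∀ (hj : j < cands.length), pvPred field cands[j] r0 = false := by
        intro j hj _
        simpa using hlt j hj
      have hi0 : i ≠ 0 := by
        intro hz
        exact h0 r0 List.mem_cons_self (by rw [hidx, hz])
      simp only [hi0, if_false]
      cases best with
      | none =>
        rw [ih (some (i, r0)) hallr h0r]
        have hs := pvSplit field cands r0 rest i cands.length (by omega) hi hFi hlt'
        rw [List.take_length] at hs
        simp only [pvRefB, hs]
        cases (cands.take i).findSome? (fun c => rest.find? (fun r => pvPred field c r)) <;> simp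
      | some b =>
        obtain ⟨bi, br⟩ := b
        by_cases hib : i < bi
        · simp only [hib, if_true]
          rw [ih (some (i, r0)) hallr h0r]
          simp only [pvRefB, pvSplit field cands r0 rest i bi hib hi hFi hlt']
          cases (cands.take i).findSome? (fun c => rest.find? (fun r => pvPred field c r)) <;> simp
        · simp only [hib, if_false]
          rw [ih (some (bi, br)) hallr h0r]
          have hcg : (cands.take bi).findSome? (fun c => (r0 :: rest).find? (fun r => pvPred field c r))
              = (cands.take bi).findSome? (fun c => rest.find? (fun r => pvPred field c r)) := by
            apply pv_findSome?_congr
            intro c hc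
            obtain ⟨j, hjm, hje⟩ := List.mem_take_iff_getElem.mp hc
            have hj1 : j < i := by omega
            have hj2 : j < cands.length := lt_of_lt_of_le hjm (min_le_right _ _)
            rw [List.find?_cons]
            have : pvPred field c r0 = false := by rw [← hje]; exact hlt' j hj1 hj2
            simp only [this]
          simp only [pvRefB, hcg]

-- ===== VERDICT (by name: the statement is the Claim_ definition above) =====
theorem find_closest_record_spec : Claim_equal_find_closest_record := by
  intro records field value hier _hdom hpre
  unfold Spec_find_closest_record find_closest_record find_closest_record_alt
  rcases hpre with ⟨h1, h2⟩
  cases hirp : pvIsRecordPresent records field value with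
  | none =>
    obtain ⟨j, hj, hnf, hnone⟩ := pvL5 field value records hirp
    obtain ⟨k, hk, hmk⟩ := h1 j hj hnf
    have hc := hnone k hk
    rw [hmk] at hc
    cases hc
  | some o =>
    cases o with
    | some r => simpa using (pvL1 field value records r hirp hier none).symm
    | none =>
      have hall : ∀ r ∈ records, pvHasF field r = true := fun r hr => (pvL2 field value records hirp r hr).1
      have hval : ∀ r ∈ records, pvPred field value r = false := fun r hr => (pvL2 field value records hirp r hr).2
      have h0 : ∀ r ∈ records, (value :: hier).findIdx? (fun c => pvPred field c r) ≠ some 0 := by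
        intro r hr
        simp [List.findIdx?_cons, hval r hr]
      rw [pvKey field (value :: hier) records none hall h0]
      simp only [pvRefB, List.findSome?_cons]
      have : records.find? (fun r => pvPred field value r) = none :=
        List.find?_eq_none.mpr (fun r hr => by simp [hval r hr])
      rw [this, pvL4 field records hier hall]
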